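-- pv_equiv track=rewrite | github.com/dolunayozerennn/antigravity-egitim | Paylasima_Hazir/Antigravity 2/Projeler/Marka_Outreach/src/contact_finder.py | _select_best_general
-- ===== SOURCE A (Python) =====
-- def _select_best_general(general_emails):
--     """
--     Genel emailler arasından en uygununu seç.
--     partnerships@ > business@ > hello@ > contact@ > info@ sıralaması.
--     """
--     # Tercih sırası — partnerships/business en iyi
--     priority_prefixes = [
--         "partnerships@", "partner@", "business@", "marketing@",
--         "collab@", "influencer@", "creators@",
--         "hello@", "contact@", "info@",
--     ]
--
--     for prefix in priority_prefixes:
--         for email in general_emails: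
--             if email.lower().startswith(prefix):
--                 return email
--
--     # Hiçbiri eşleşmezse ilkini döndür
--     return general_emails[0]
-- ===== SOURCE B (Python) =====
-- def _select_best_general(general_emails):
--     priority_prefixes = [
--         "partnerships@", "partner@", "business@", "marketing@",
--         "collab@", "influencer@", "creators@",
--         "hello@", "contact@", "info@",
--     ]
--     n = len(priority_prefixes)
--     best_email = None
--     best_rank = n
--     for email in general_emails:
--         low = email.lower()
--         r = next((i for i, p in enumerate(priority_prefixes) if low.startswith(p)), n)
--         if r < best_rank:
--             best_email, best_rank = email, r
--     if best_email is None: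
--         return general_emails[0]
--     return best_email
-- ===== Notes on version B (the rewrite author's own statement) =====
-- stated objective: alternative
-- what changed: A scans the email list once per prefix (prefix-major double loop, returning the first match of the first successful prefix); B makes a single pass over the emails, computing each email's priority rank (index of its first matching prefix) and keeping the first email with the strictly smallest rank, falling back to the first email when nothing matches.
import Mathlib
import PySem

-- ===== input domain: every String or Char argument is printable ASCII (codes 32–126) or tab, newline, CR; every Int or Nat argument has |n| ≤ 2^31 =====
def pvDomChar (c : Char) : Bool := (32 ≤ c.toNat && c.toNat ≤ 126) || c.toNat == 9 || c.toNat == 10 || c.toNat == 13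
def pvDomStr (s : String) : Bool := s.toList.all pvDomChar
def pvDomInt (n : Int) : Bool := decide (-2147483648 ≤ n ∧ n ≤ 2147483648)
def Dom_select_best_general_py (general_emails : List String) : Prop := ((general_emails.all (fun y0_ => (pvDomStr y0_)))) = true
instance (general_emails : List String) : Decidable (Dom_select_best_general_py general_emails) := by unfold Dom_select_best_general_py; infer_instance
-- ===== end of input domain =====

-- B replaces A's prefix-major double loop by a single pass over the emails tracking the
-- best (lowest) priority rank seen so far (objective: alternative; same exact results).
-- Pre_ excludes only the empty list, on which Python A raises IndexError.


-- ===== PORT A =====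
def pvPrefixesA : List String :=
  ["partnerships@", "partner@", "business@", "marketing@",
   "collab@", "influencer@", "creators@",
   "hello@", "contact@", "info@"]

-- 'for prefix in priority_prefixes: for email in general_emails: if …: return email'
-- (the inner loop returns the first matching email = List.find?)
def pvLoopA : List String → List String → Option String
  | [], _ => none
  | p :: ps, emails =>
    match emails.find? (fun e => PySem.Str.startswith (PySem.Str.lower e) p) with
    | some e => some e
    | none => pvLoopA ps emails

def select_best_general_py (general_emails : List String) : String :=
  match pvLoopA pvPrefixesA general_emails with
  | some e => e
  | none => (PySem.List.pyGet? general_emails 0).getD ""  -- general_emails[0]; IndexError (none) on [] is excluded by Pre_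

-- ===== PORT B =====
def pvPrefixesB : List String :=
  ["partnerships@", "partner@", "business@", "marketing@",
   "collab@", "influencer@", "creators@",
   "hello@", "contact@", "info@"]

-- r = next((i for i, p in enumerate(priority_prefixes) if low.startswith(p)), n)
--   = index of the first matching prefix, n (= 10) if none: exactly List.findIdx
def pvRankB (low : String) : Nat :=
  pvPrefixesB.findIdx (fun p => PySem.Str.startswith low p)

def select_best_general_py_alt (general_emails : List String) : String :=
  let st := general_emails.foldl
    (fun (b : Option String × Nat) email =>
      let r := pvRankB (PySem.Str.lower email)
      if r < b.2 then (some email, r) else b)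
    (none, 10)
  match st.1 with
  | some e => e
  | none => (PySem.List.pyGet? general_emails 0).getD ""  -- general_emails[0]; [] is excluded by Pre_

-- ===== PRECONDITION & SPEC =====
-- Python A raises IndexError on the empty list (general_emails[0]); that is the only exception.
def Pre_select_best_general_py (general_emails : List String) : Prop := general_emails ≠ []
instance (general_emails : List String) : Decidable (Pre_select_best_general_py general_emails) := by unfold Pre_select_best_general_py; infer_instance
def pvWitness_select_best_general_py : List String := ["Info@shop.com", "x@y.z"]

def Spec_select_best_general_py (general_emails : List String) (out : String) : Prop := out = select_best_general_py_alt general_emails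
instance (general_emails : List String) (out : String) : Decidable (Spec_select_best_general_py general_emails out) := by unfold Spec_select_best_general_py; infer_instance

-- ===== CLAIM (what is proved, stated in full; the proofs are below) =====
def Claim_equal_select_best_general_py : Prop := ∀ (general_emails : List String), Dom_select_best_general_py general_emails → Pre_select_best_general_py general_emails → Spec_select_best_general_py general_emails (select_best_general_py general_emails)

-- ===== LEMMAS AND PROOFS =====

-- B's best-tracking pass, generalized over the prefix list and the start state
def pvFoldR (ps : List String) : List String → (Option String × Nat) → Option String × Nat
  | [], st => st
  | e :: xs, st =>
    pvFoldR ps xs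
      (if ps.findIdx (fun p => PySem.Str.startswith (PySem.Str.lower e) p) < st.2
       then (some e, ps.findIdx (fun p => PySem.Str.startswith (PySem.Str.lower e) p)) else st)

theorem pvFoldR_nil (xs : List String) (b : Option String) : pvFoldR [] xs (b, 0) = (b, 0) := by
  induction xs with
  | nil => rfl
  | cons x xs ih => simpa only [pvFoldR, List.findIdx_nil, Nat.lt_irrefl, if_false] using ih

theorem pvFoldR_freeze (ps : List String) (xs : List String) (e : String) :
    pvFoldR ps xs (some e, 0) = (some e, 0) := by
  induction xs with
  | nil => rfl
  | cons x xs ih => simpa only [pvFoldR, Nat.not_lt_zero, if_false] using ih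

theorem pvFoldR_shift (p : String) (ps : List String) (xs : List String)
    (h : ∀ e ∈ xs, PySem.Str.startswith (PySem.Str.lower e) p = false) :
    ∀ (b : Option String) (n : Nat),
      pvFoldR (p :: ps) xs (b, n + 1)
        = ((pvFoldR ps xs (b, n)).1, (pvFoldR ps xs (b, n)).2 + 1) := by
  induction xs with
  | nil => intro b n; rfl
  | cons x xs ih =>
    intro b n
    have hx := h x (by simp)
    have hxs : ∀ e ∈ xs, PySem.Str.startswith (PySem.Str.lower e) p = false :=
      fun e he => h e (by simp [he])
    simp only [pvFoldR, List.findIdx_cons, hx, cond_false]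
    by_cases hlt : List.findIdx (fun q => PySem.Str.startswith (PySem.Str.lower x) q) ps < n
    · rw [if_pos (by omega), if_pos hlt]
      exact ih hxs _ _
    · rw [if_neg (by omega), if_neg hlt]
      exact ih hxs b n

theorem pvFoldR_snd_pos (p : String) (ps : List String) (xs : List String)
    (h : ∀ e ∈ xs, PySem.Str.startswith (PySem.Str.lower e) p = false) :
    ∀ (b : Option String) (n : Nat), 1 ≤ n → 1 ≤ (pvFoldR (p :: ps) xs (b, n)).2 := by
  induction xs with
  | nil => intro b n hn; exact hn
  | cons x xs ih =>
    intro b n hn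
    have hx := h x (by simp)
    have hxs : ∀ e ∈ xs, PySem.Str.startswith (PySem.Str.lower e) p = false :=
      fun e he => h e (by simp [he])
    simp only [pvFoldR, List.findIdx_cons, hx, cond_false]
    split
    · exact ih hxs _ _ (by omega)
    · exact ih hxs b n hn

theorem pvFoldR_append (ps : List String) (as bs : List String) (st : Option String × Nat) :
    pvFoldR ps (as ++ bs) st = pvFoldR ps bs (pvFoldR ps as st) := by
  induction as generalizing st with
  | nil => rfl
  | cons a as ih => simp only [List.cons_append, pvFoldR]; exact ih _

-- main characterization: A's prefix-major search equals B's single-pass best tracking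
theorem pvLoopA_eq_fold (ps : List String) (xs : List String) :
    pvLoopA ps xs = (pvFoldR ps xs (none, ps.length)).1 := by
  induction ps with
  | nil => simp [pvLoopA, pvFoldR_nil]
  | cons p ps ih =>
    cases hf : xs.find? (fun e => PySem.Str.startswith (PySem.Str.lower e) p) with
    | none =>
      have hnone : ∀ e ∈ xs, PySem.Str.startswith (PySem.Str.lower e) p = false := by
        intro e he
        have := List.find?_eq_none.mp hf e he
        simpa using this
      simp only [pvLoopA, hf, List.length_cons]
      rw [pvFoldR_shift p ps xs hnone none ps.length]
      exact ih
    | some e₀ =>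
      obtain ⟨he₀, as, bs, hsplit, hno⟩ := List.find?_eq_some_iff_append.mp hf
      have hno' : ∀ a ∈ as, PySem.Str.startswith (PySem.Str.lower a) p = false := by
        intro a ha; have := hno a ha; simpa using this
      simp only [pvLoopA, hf]
      rw [hsplit, pvFoldR_append]
      have hpos : 1 ≤ (pvFoldR (p :: ps) as (none, (p :: ps).length)).2 :=
        pvFoldR_snd_pos p ps as hno' none _ (by simp)
      simp only [pvFoldR, List.findIdx_cons, he₀, cond_true]
      rw [if_pos (by omega), pvFoldR_freeze]

-- pvFoldR over A's prefix list is exactly the foldl written in port B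
theorem pvFoldR_eq_foldl (xs : List String) :
    ∀ st : Option String × Nat,
      pvFoldR pvPrefixesA xs st
        = xs.foldl (fun (b : Option String × Nat) email =>
            let r := pvRankB (PySem.Str.lower email)
            if r < b.2 then (some email, r) else b) st := by
  induction xs with
  | nil => intro st; rfl
  | cons x xs ih =>
    intro st
    simp only [pvFoldR, List.foldl]
    exact ih _

theorem ports_agree (xs : List String) :
    select_best_general_py xs = select_best_general_py_alt xs := by
  have h := pvLoopA_eq_fold pvPrefixesA xs
  rw [pvFoldR_eq_foldl] at h
  have h10 : pvPrefixesA.length = 10 := rfl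
  rw [h10] at h
  unfold select_best_general_py select_best_general_py_alt
  rw [h]

-- ===== VERDICT (by name: the statement is the Claim_ definition above) =====
theorem select_best_general_py_spec : Claim_equal_select_best_general_py := by
  intro xs _ _
  exact ports_agree xs
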